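-- pv_equiv track=rewrite | github.com/izivkov/GShockTimeServer | src/gshocktimeserver/utils.py | to_compact_string
-- ===== SOURCE A (Python) =====
-- def to_compact_string(hexStr):
--     compactString = ""
--     strArray = hexStr.split(' ')
--     for s in strArray:
--         if s.startswith("0x"):
--             s = removePrefix(s, "0x")
--         compactString += s
--
--     return compactString
--
-- def removePrefix(string, prefix):
--     return string[len(prefix):] if string.startswith(prefix) else string
-- ===== SOURCE B (Python) =====
-- def to_compact_string(hexStr):
--     # Single left-to-right character scan with a token-start flag:
--     # drop spaces, skip a "0x" only when it begins a token, copy everything else.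
--     out = []
--     i = 0
--     n = len(hexStr)
--     start = True
--     while i < n:
--         c = hexStr[i]
--         if c == ' ':
--             start = True
--             i += 1
--         elif start and c == '0' and i + 1 < n and hexStr[i + 1] == 'x':
--             i += 2
--             start = False
--         else:
--             out.append(c)
--             start = False
--             i += 1
--     return ''.join(out)
-- ===== Notes on version B (the rewrite author's own statement) =====
-- stated objective: alternative
-- what changed: Replaced split-into-tokens + per-token prefix-strip + string concatenation by a single left-to-right character scan with a token-start flag that drops spaces and skips a '0x' only at a token start; no intermediate token list is built.
import Mathlib
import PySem

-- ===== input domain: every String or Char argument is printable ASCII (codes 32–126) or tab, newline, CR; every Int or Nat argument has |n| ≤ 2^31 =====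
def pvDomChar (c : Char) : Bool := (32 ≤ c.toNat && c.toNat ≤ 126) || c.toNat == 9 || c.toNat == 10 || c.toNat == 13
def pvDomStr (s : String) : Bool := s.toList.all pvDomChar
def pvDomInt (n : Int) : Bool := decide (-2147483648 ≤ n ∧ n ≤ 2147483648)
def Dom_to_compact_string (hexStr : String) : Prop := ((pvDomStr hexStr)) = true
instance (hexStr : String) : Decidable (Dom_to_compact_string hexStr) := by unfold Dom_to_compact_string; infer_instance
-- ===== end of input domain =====

-- B replaces A's split-into-tokens / per-token prefix-strip / string concatenation by a single
-- left-to-right character scan with a token-start flag (alternative decomposition, same result, same cost).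


-- ===== PORT A =====
-- helper: removePrefix(string, prefix) = string[len(prefix):] if string.startswith(prefix) else string
def removePrefixC (s p : List Char) : List Char :=
  if PySem.Chars.startswith s p then PySem.Chars.slice s (some (p.length : Int)) none else s

-- A: split on ' ', strip a leading "0x" from each token, accumulate with compactString +=
def to_compact_string (hexStr : String) : String :=
  String.ofList
    ((PySem.Chars.splitOn hexStr.toList [' ']).foldl
      (fun compactString s =>
        compactString ++ (if PySem.Chars.startswith s ['0', 'x'] then removePrefixC s ['0', 'x'] else s))
      [])

-- ===== PORT B =====
-- the while loop of Source B: one index scan with a token-start flag, as structural recursion on the chars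
def altGo (start : Bool) : List Char → List Char
  | [] => []
  | ' ' :: rest => altGo true rest
  | '0' :: 'x' :: rest => if start then altGo false rest else '0' :: altGo false ('x' :: rest)
  | c :: rest => c :: altGo false rest
termination_by l => l.length

def to_compact_string_alt (hexStr : String) : String :=
  String.ofList (altGo true hexStr.toList)

-- ===== PRECONDITION & SPEC =====
def Spec_to_compact_string (hexStr : String) (out : String) : Prop := out = to_compact_string_alt hexStr
instance (hexStr : String) (out : String) : Decidable (Spec_to_compact_string hexStr out) := by unfold Spec_to_compact_string; infer_instance

-- ===== CLAIM (what is proved, stated in full; the proofs are below) =====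
def Claim_equal_to_compact_string : Prop := ∀ (hexStr : String), Dom_to_compact_string hexStr → Spec_to_compact_string hexStr (to_compact_string hexStr)

-- ===== LEMMAS AND PROOFS =====

-- clean accumulator recursion equal to splitOn.go's fuelled loop (proof-side only)
def splitAux : List Char → List Char → List (List Char)
  | [], cur => [cur.reverse]
  | c :: rest, cur => if c = ' ' then cur.reverse :: splitAux rest [] else splitAux rest (c :: cur)

lemma go_spec (fuel : Nat) : ∀ (l cur : List Char) (acc : List (List Char)),
    l.length ≤ fuel →
    PySem.Chars.splitOn.go [' '] fuel l cur acc = acc.reverse ++ splitAux l cur := by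
  induction fuel with
  | zero =>
    intro l cur acc h
    have hl : l = [] := List.eq_nil_of_length_eq_zero (Nat.le_zero.mp h)
    subst hl
    simp [PySem.Chars.splitOn.go, splitAux]
  | succ n ih =>
    intro l cur acc h
    cases l with
    | nil => simp [PySem.Chars.splitOn.go, splitAux]
    | cons c rest =>
      rw [PySem.Chars.splitOn.go]
      split_ifs with hif
      · have hc : c = ' ' := by
          simp [List.isPrefixOf] at hif; exact hif.symm
        subst hc
        rw [ih _ _ _ (by simpa using Nat.le_of_succ_le_succ h)]
        simp [splitAux]
      · have hc : c ≠ ' ' := by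
          simp [List.isPrefixOf] at hif; exact fun hh => hif hh.symm
        rw [ih _ _ _ (by simpa using Nat.le_of_succ_le_succ h)]
        simp [splitAux, hc]

lemma splitOn_eq_splitAux (l : List Char) :
    PySem.Chars.splitOn l [' '] = splitAux l [] := by
  rw [PySem.Chars.splitOn, go_spec _ _ _ _ (Nat.le_succ _)]
  simp

-- (first token of l, remaining tokens of l), in one pass
def splitSp : List Char → List Char × List (List Char)
  | [] => ([], [])
  | c :: r => let p := splitSp r
              if c = ' ' then ([], p.1 :: p.2) else (c :: p.1, p.2)

-- what A does to one token
def procTok (t : List Char) : List Char :=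
  if PySem.Chars.startswith t ['0', 'x'] then t.drop 2 else t

lemma splitAux_eq_splitSp : ∀ (l cur : List Char),
    splitAux l cur = (cur.reverse ++ (splitSp l).1) :: (splitSp l).2 := by
  intro l
  induction l with
  | nil => intro cur; simp [splitAux, splitSp]
  | cons c r ih =>
    intro cur
    by_cases hc : c = ' '
    · subst hc; simp [splitAux, splitSp, ih]
    · simp [splitAux, splitSp, hc, ih]

lemma altGo_spec : ∀ (b : Bool) (l : List Char),
    altGo b l = (if b then procTok (splitSp l).1 else (splitSp l).1)
                ++ ((splitSp l).2).flatMap procTok := by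
  intro b l
  induction b, l using altGo.induct with
  | case1 b => cases b <;> simp [altGo, splitSp, procTok, PySem.Chars.startswith]
  | case2 b rest ih =>
    simp [altGo, splitSp, ih, procTok]
  | case3 rest ih =>
    simp [altGo, splitSp, ih, procTok, PySem.Chars.startswith, List.isPrefixOf]
  | case4 b rest hb ih =>
    have hb' : b = false := by simpa using hb
    subst hb'
    rw [altGo.eq_3]
    simp only [Bool.false_eq_true, if_false]
    rw [ih]
    simp [splitSp]
  | case5 b c rest hsp h0x ih =>
    rw [altGo.eq_4 _ _ _ hsp h0x, ih]
    have hc : ¬ c = ' ' := fun hh => hsp hh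
    by_cases hb : b
    · subst hb
      simp only [splitSp, if_neg hc]
      have hnp : PySem.Chars.startswith (c :: (splitSp rest).1) ['0', 'x'] = false := by
        cases rest with
        | nil => simp [splitSp, PySem.Chars.startswith, List.isPrefixOf]
        | cons d r' =>
          by_cases hd : d = ' '
          · subst hd
            simp [splitSp, PySem.Chars.startswith, List.isPrefixOf]
          · have hdx : ¬ (c = '0' ∧ d = 'x') := by
              intro ⟨h0, hx⟩; exact h0x r' h0 (by rw [hx])
            simp [splitSp, hd, PySem.Chars.startswith, List.isPrefixOf]
            intro h0 hx; exact hdx ⟨h0.symm, hx.symm⟩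
      simp [procTok, hnp]
    · have hb' : b = false := by simpa using hb
      subst hb'
      simp [splitSp, hc]

lemma procTok_eq_A_step (s : List Char) :
    (if PySem.Chars.startswith s ['0', 'x'] then removePrefixC s ['0', 'x'] else s) = procTok s := by
  unfold removePrefixC procTok
  by_cases h : PySem.Chars.startswith s ['0', 'x'] = true
  · simp only [h, if_true]
    simp [pysem]
  · simp [h]

-- ===== VERDICT (by name: the statement is the Claim_ definition above) =====
theorem to_compact_string_spec : Claim_equal_to_compact_string := by
  intro s _
  unfold Spec_to_compact_string to_compact_string to_compact_string_alt
  simp only [procTok_eq_A_step]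
  rw [PySem.List.foldl_append_eq_flatMap procTok _ []]
  rw [splitOn_eq_splitAux, splitAux_eq_splitSp, altGo_spec]
  simp
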